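-- pv_equiv track=rewrite | github.com/LeoYANQING/AskThenRearrange | task_matter_json.py | match_object
-- ===== SOURCE A (Python) =====
-- from typing import Dict, List, Optional, Tuple
--
-- def match_object(name: str, candidates: List[str]) -> Optional[str]:
--     name = name.lower().strip()
--     for cand in candidates:
--         if cand.lower() == name:
--             return cand
--     # Partial match
--     for cand in candidates:
--         if cand.lower() in name or name in cand.lower():
--             return cand
--     return None
-- ===== SOURCE B (Python) =====
-- def match_object(name, candidates):
--     name = name.lower().strip()
--     first_partial = None
--     for cand in candidates:
--         lc = cand.lower()
--         if lc == name:
--             return cand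
--         if first_partial is None and (lc in name or name in lc):
--             first_partial = cand
--     return first_partial
-- ===== Notes on version B (the rewrite author's own statement) =====
-- stated objective: alternative
-- what changed: Replaces A's two sequential scans (exact scan, then partial scan) by a single pass that returns at the first exact match and otherwise remembers the first partial match in a sentinel.
import Mathlib
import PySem

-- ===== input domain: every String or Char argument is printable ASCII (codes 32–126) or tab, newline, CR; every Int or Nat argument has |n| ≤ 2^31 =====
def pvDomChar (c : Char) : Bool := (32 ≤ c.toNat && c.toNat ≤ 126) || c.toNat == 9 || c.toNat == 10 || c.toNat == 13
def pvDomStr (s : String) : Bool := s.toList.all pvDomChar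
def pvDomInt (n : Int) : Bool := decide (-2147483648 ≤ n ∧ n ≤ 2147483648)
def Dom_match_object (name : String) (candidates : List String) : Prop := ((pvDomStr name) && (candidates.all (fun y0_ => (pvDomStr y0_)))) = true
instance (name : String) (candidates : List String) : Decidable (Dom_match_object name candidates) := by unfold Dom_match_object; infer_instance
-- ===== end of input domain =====

-- B replaces A's two sequential scans by one pass keeping the first exact and first partial match; same result, similar cost.

-- ===== PORT A =====
-- first loop of A: return the first candidate whose lowercase equals n
def firstExactA (n : String) : List String → Option String
  | [] => none
  | cand :: rest =>
      if PySem.Str.lower cand == n then some cand else firstExactA n rest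

-- second loop of A: return the first candidate related to n by substring either way
def firstPartialA (n : String) : List String → Option String
  | [] => none
  | cand :: rest =>
      if PySem.Str.isIn (PySem.Str.lower cand) n || PySem.Str.isIn n (PySem.Str.lower cand)
      then some cand else firstPartialA n rest

def match_object (name : String) (candidates : List String) : Option String :=
  let n := PySem.Str.strip (PySem.Str.lower name)
  match firstExactA n candidates with
  | some c => some c
  | none => firstPartialA n candidates

-- ===== PORT B =====
-- B's single loop: return at the first exact match, else remember the first partial match (fp)
def loopB (n : String) : List String → Option String → Option String
  | [], fp => fp
  | cand :: rest, fp =>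
      let lc := PySem.Str.lower cand
      if lc == n then some cand
      else if fp.isNone && (PySem.Str.isIn lc n || PySem.Str.isIn n lc) then
        loopB n rest (some cand)
      else loopB n rest fp

def match_object_alt (name : String) (candidates : List String) : Option String :=
  let n := PySem.Str.strip (PySem.Str.lower name)
  loopB n candidates none

-- ===== PRECONDITION & SPEC =====
def Spec_match_object (name : String) (candidates : List String) (out : Option String) : Prop := out = match_object_alt name candidates
instance (name : String) (candidates : List String) (out : Option String) : Decidable (Spec_match_object name candidates out) := by unfold Spec_match_object; infer_instance

-- ===== CLAIM (what is proved, stated in full; the proofs are below) =====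
def Claim_equal_match_object : Prop := ∀ (name : String) (candidates : List String), Dom_match_object name candidates → Spec_match_object name candidates (match_object name candidates)

-- ===== LEMMAS AND PROOFS =====

-- first non-exact candidate related to n by substring (what B's elif records)
def firstPartialB (n : String) : List String → Option String
  | [] => none
  | cand :: rest =>
      if PySem.Str.lower cand == n then firstPartialB n rest
      else if PySem.Str.isIn (PySem.Str.lower cand) n || PySem.Str.isIn n (PySem.Str.lower cand)
      then some cand else firstPartialB n rest

lemma loopB_eq (n : String) (l : List String) (fp : Option String) :
    loopB n l fp =
    (match firstExactA n l with
     | some c => some c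
     | none => match fp with | some q => some q | none => firstPartialB n l) := by
  induction l generalizing fp with
  | nil => cases fp <;> rfl
  | cons cand rest ih =>
      simp only [loopB, firstExactA, firstPartialB]
      by_cases hx : (PySem.Str.lower cand == n) = true
      · simp [hx]
      · simp only [hx, Bool.false_eq_true, if_false]
        by_cases hc : (PySem.Str.isIn (PySem.Str.lower cand) n || PySem.Str.isIn n (PySem.Str.lower cand)) = true
        · cases fp with
          | none =>
              simp only [Option.isNone_none, hc, Bool.true_and, if_true]
              rw [ih (some cand)]
          | some q =>
              simp only [Option.isNone_some, Bool.false_and, Bool.false_eq_true, if_false]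
              rw [ih (some q)]
        · simp only [hc, Bool.and_false, Bool.false_eq_true, if_false]
          rw [ih fp]

lemma partialA_eq_partialB (n : String) (l : List String) (h : firstExactA n l = none) :
    firstPartialA n l = firstPartialB n l := by
  induction l with
  | nil => rfl
  | cons cand rest ih =>
      simp only [firstExactA] at h
      by_cases hx : (PySem.Str.lower cand == n) = true
      · simp [hx] at h
      · simp only [hx, Bool.false_eq_true, if_false] at h
        simp only [firstPartialA, firstPartialB, hx, Bool.false_eq_true, if_false]
        split
        · rfl
        · exact ih h

-- ===== VERDICT (by name: the statement is the Claim_ definition above) =====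
theorem match_object_spec : Claim_equal_match_object := by
  intro name candidates _
  unfold Spec_match_object match_object match_object_alt
  rw [loopB_eq]
  cases h : firstExactA (PySem.Str.strip (PySem.Str.lower name)) candidates with
  | some c => simp [h]
  | none => simp [h, partialA_eq_partialB _ _ h]
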